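-- pv_equiv track=rewrite | github.com/JackonYang/distributed-vertical-crawlers | dianping/plot.py | aggressive
-- ===== SOURCE A (Python) =====
-- def aggressive(data):
--     lvl_data = dict()
--     for i in data:
--         if i in lvl_data:
--             lvl_data[i] += 1
--         else:
--             lvl_data[i] = 1
--     return sorted(lvl_data.items(), key=lambda d: d[0])
-- ===== SOURCE B (Python) =====
-- def aggressive(data):
--     # sort once, then collapse runs of equal consecutive elements
--     out = []
--     prev = None
--     cnt = 0
--     for x in sorted(data):
--         if cnt and x == prev:
--             cnt += 1
--         else:
--             if cnt:
--                 out.append((prev, cnt))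
--             prev = x
--             cnt = 1
--     if cnt:
--         out.append((prev, cnt))
--     return out
-- ===== Notes on version B (the rewrite author's own statement) =====
-- stated objective: idiomatic
-- what changed: Replaces A's dict-based counting pass plus a final key-sort of the items with a single sort of the data followed by one linear pass that collapses runs of equal consecutive elements into (value, count) pairs, already in key order.
import Mathlib
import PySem

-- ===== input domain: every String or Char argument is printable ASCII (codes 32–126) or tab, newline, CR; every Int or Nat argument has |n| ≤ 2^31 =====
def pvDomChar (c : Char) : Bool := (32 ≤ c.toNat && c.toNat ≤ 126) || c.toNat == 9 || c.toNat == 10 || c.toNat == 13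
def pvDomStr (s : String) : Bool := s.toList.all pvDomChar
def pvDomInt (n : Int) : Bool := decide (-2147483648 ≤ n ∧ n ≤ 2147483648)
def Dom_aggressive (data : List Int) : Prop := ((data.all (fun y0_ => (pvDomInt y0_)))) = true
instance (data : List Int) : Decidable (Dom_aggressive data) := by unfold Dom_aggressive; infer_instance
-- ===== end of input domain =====

-- B replaces A's hash-counting dict + final sort by a single sort followed by a
-- run-length collapse of equal consecutive elements (objective: idiomatic sort-and-group).

-- ===== PORT A =====
def aggressive (data : List Int) : List (Int × Int) :=
  PySem.List.sorted
    (data.foldl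
      (fun d i => if d.contains i then d.insert i (d.getD i 0 + 1) else d.insert i 1)
      PySem.Dict.empty).items
    (fun p => p.1) false

-- ===== PORT B =====
-- one step of B's loop over the sorted list: state = (out, prev, cnt)
def aggressiveAltStep (st : List (Int × Int) × Option Int × Int) (x : Int) :
    List (Int × Int) × Option Int × Int :=
  let (out, prev, cnt) := st
  if cnt ≠ 0 ∧ some x = prev then (out, prev, cnt + 1)
  else ((if cnt ≠ 0 then out ++ [(prev.getD 0, cnt)] else out), some x, 1)

-- B's trailing 'if cnt: out.append((prev, cnt))'
def aggressiveAltFlush (st : List (Int × Int) × Option Int × Int) : List (Int × Int) :=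
  let (out, prev, cnt) := st
  if cnt ≠ 0 then out ++ [(prev.getD 0, cnt)] else out

def aggressive_alt (data : List Int) : List (Int × Int) :=
  aggressiveAltFlush
    ((PySem.List.sorted data (fun x => x) false).foldl aggressiveAltStep ([], none, 0))

-- ===== PRECONDITION & SPEC =====
def Spec_aggressive (data : List Int) (out : List (Int × Int)) : Prop := out = aggressive_alt data
instance (data : List Int) (out : List (Int × Int)) : Decidable (Spec_aggressive data out) := by unfold Spec_aggressive; infer_instance

-- ===== CLAIM (what is proved, stated in full; the proofs are below) =====
def Claim_equal_aggressive : Prop := ∀ (data : List Int), Dom_aggressive data → Spec_aggressive data (aggressive data)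

-- ===== LEMMAS AND PROOFS =====

-- specification-side run-length encoding of a list (groups equal consecutive elements)
def rleSpec : List Int → List (Int × Int)
  | [] => []
  | x :: xs =>
      (x, 1 + ((xs.takeWhile (· == x)).length : Int)) :: rleSpec (xs.dropWhile (· == x))
  termination_by l => l.length
  decreasing_by
    simp only [List.length_cons]
    exact Nat.lt_succ_of_le (List.length_dropWhile_le _ _)

-- B's fold, started in a run (prev = some p, 0 < c), computes out ++ the RLE continuation
theorem foldl_step_eq_rle (l : List Int) :
    ∀ (out : List (Int × Int)) (p : Int) (c : Int), 0 < c →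
    aggressiveAltFlush (l.foldl aggressiveAltStep (out, some p, c)) =
      out ++ (p, c + ((l.takeWhile (· == p)).length : Int)) :: rleSpec (l.dropWhile (· == p)) := by
  induction l with
  | nil =>
      intro out p c hc
      simp [aggressiveAltFlush, rleSpec]
      omega
  | cons x xs ih =>
      intro out p c hc
      by_cases hx : x = p
      · subst hx
        have hc0 : ¬ c = 0 := by omega
        have hstep : aggressiveAltStep (out, some x, c) x = (out, some x, c + 1) := by
          simp [aggressiveAltStep, hc0]
        rw [List.foldl_cons, hstep, ih out x (c + 1) (by omega)]
        simp
        omega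
      · have hc0 : ¬ c = 0 := by omega
        have hstep : aggressiveAltStep (out, some p, c) x = (out ++ [(p, c)], some x, 1) := by
          simp [aggressiveAltStep, hc0, hx]
        rw [List.foldl_cons, hstep, ih (out ++ [(p, c)]) x 1 (by omega)]
        have hxp : (x == p) = false := by simp [hx]
        simp [hxp, rleSpec, List.append_assoc]

-- B computes the run-length encoding of the sorted input
theorem alt_eq_rle (data : List Int) :
    aggressive_alt data = rleSpec (PySem.List.sorted data (fun x => x) false) := by
  unfold aggressive_alt
  cases hs : PySem.List.sorted data (fun x => x) false with
  | nil => simp [aggressiveAltFlush, rleSpec]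
  | cons x xs =>
      have hstep : aggressiveAltStep ([], none, 0) x = ([], some x, 1) := by
        simp [aggressiveAltStep]
      rw [List.foldl_cons, hstep, foldl_step_eq_rle xs [] x 1 (by omega)]
      simp [rleSpec]

-- on a ≤-sorted list, every element surviving dropWhile (· == x) is > x
theorem lt_of_mem_dropWhile {x : Int} {xs : List Int}
    (hs : (x :: xs).Pairwise (· ≤ ·)) :
    ∀ y ∈ xs.dropWhile (· == x), x < y := by
  have hle : ∀ y ∈ xs, x ≤ y := (List.pairwise_cons.mp hs).1
  have hsub : (xs.dropWhile (· == x)).Sublist xs := List.dropWhile_sublist _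
  cases hd : xs.dropWhile (· == x) with
  | nil => intro y hy; simp at hy
  | cons h t =>
      have hhx : (h == x) = false := by
        have := List.head_dropWhile_not (· == x) (l := xs) (by rw [hd]; simp)
        simpa [hd] using this
      have hpw : (h :: t).Pairwise (· ≤ ·) :=
        ((List.pairwise_cons.mp hs).2).sublist (hd ▸ hsub)
      have hxh : x < h := by
        have : x ≤ h := hle h (hsub.mem (by rw [hd]; simp))
        have : x ≠ h := fun e => by simp [e] at hhx
        omega
      intro y hy
      rcases List.mem_cons.mp hy with rfl | hyt
      · exact hxh
      · exact lt_of_lt_of_le hxh ((List.pairwise_cons.mp hpw).1 y hyt)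

-- duplicated head collapses in set(x :: x :: ys)
theorem ofList_cons_cons_self (x : Int) (ys : List Int) :
    PySem.Set.ofList (x :: x :: ys) = PySem.Set.ofList (x :: ys) := by
  simp [PySem.Set.ofList_cons, PySem.Set.discard, List.filter_filter]

-- peeling the leading run off set(l) for a ≤-sorted list
theorem ofList_sorted_cons {x : Int} {xs : List Int}
    (hs : (x :: xs).Pairwise (· ≤ ·)) :
    PySem.Set.ofList (x :: xs) = x :: PySem.Set.ofList (xs.dropWhile (· == x)) := by
  have hd := lt_of_mem_dropWhile hs
  -- all taken elements equal x, all kept elements differ from x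
  have key : ∀ (t : List Int), (∀ y ∈ t, y = x) →
      PySem.Set.ofList (x :: (t ++ xs.dropWhile (· == x))) =
        x :: PySem.Set.ofList (xs.dropWhile (· == x)) := by
    intro t
    induction t with
    | nil =>
        intro _
        rw [List.nil_append, PySem.Set.ofList_cons]
        congr 1
        unfold PySem.Set.discard
        apply List.filter_eq_self.mpr
        intro y hy
        have : x < y := hd y ((PySem.Set.mem_ofList _ _).mp hy)
        simp; omega
    | cons a t' ih =>
        intro ht
        have ha : a = x := ht a (by simp)
        subst ha
        rw [List.cons_append, ofList_cons_cons_self,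
          ih (fun y hy => ht y (by simp [hy]))]
  have := key (xs.takeWhile (· == x)) (fun y hy => by
    have := List.mem_takeWhile_imp hy; simpa using this)
  rwa [List.takeWhile_append_dropWhile] at this

-- count facts for the leading run
theorem count_head_run {x : Int} {xs : List Int}
    (hs : (x :: xs).Pairwise (· ≤ ·)) :
    ((x :: xs).count x : Int) = 1 + ((xs.takeWhile (· == x)).length : Int) := by
  have hd := lt_of_mem_dropWhile hs
  have h0 : (xs.dropWhile (· == x)).count x = 0 :=
    List.count_eq_zero.mpr (fun hm => by have := hd x hm; omega)
  have ht : (xs.takeWhile (· == x)).count x = (xs.takeWhile (· == x)).length :=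
    List.count_eq_length.mpr (fun b hb => by
      have := List.mem_takeWhile_imp hb; simp at this; omega)
  have hxs : xs.count x = (xs.takeWhile (· == x)).length := by
    conv_lhs => rw [← List.takeWhile_append_dropWhile (p := (· == x)) (l := xs)]
    rw [List.count_append, h0, ht]
    omega
  rw [List.count_cons_self, hxs]
  push_cast; ring

-- the RLE of a ≤-sorted list is set(l) paired with multiplicities
theorem rle_sorted_eq (l : List Int) (hs : l.Pairwise (· ≤ ·)) :
    rleSpec l = (PySem.Set.ofList l).map (fun k => (k, (l.count k : Int))) := by
  induction l using rleSpec.induct with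
  | case1 => simp [rleSpec]
  | case2 x xs ih =>
      have hd := lt_of_mem_dropWhile hs
      rw [rleSpec, ofList_sorted_cons hs, List.map_cons,
        ih (((List.pairwise_cons.mp hs).2).sublist (List.dropWhile_sublist _))]
      refine congrArg₂ _ ?_ ?_
      · exact congrArg _ (count_head_run hs).symm
      · apply List.map_congr_left
        intro k hk
        have hkx : x < k := hd k ((PySem.Set.mem_ofList _ _).mp hk)
        have hcnt : (x :: xs).count k = (xs.dropWhile (· == x)).count k := by
          conv_lhs => rw [← List.takeWhile_append_dropWhile (p := (· == x)) (l := xs)]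
          rw [List.count_cons, List.count_append]
          have h1 : (xs.takeWhile (· == x)).count k = 0 :=
            List.count_eq_zero.mpr (fun hm => by
              have := List.mem_takeWhile_imp hm; simp at this; omega)
          have hne : ¬ k = x := by omega
          have hne' : ¬ x = k := by omega
          simp [h1, hne']
        rw [hcnt]

-- set(l) of a ≤-sorted list is strictly increasing
theorem ofList_pairwise_lt (l : List Int) (hs : l.Pairwise (· ≤ ·)) :
    (PySem.Set.ofList l).Pairwise (· < ·) := by
  induction l using rleSpec.induct with
  | case1 => simp [PySem.Set.ofList, PySem.Set.empty]
  | case2 x xs ih =>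
      rw [ofList_sorted_cons hs]
      refine List.pairwise_cons.mpr ⟨?_, ih (((List.pairwise_cons.mp hs).2).sublist (List.dropWhile_sublist _))⟩
      intro y hy
      exact lt_of_mem_dropWhile hs y ((PySem.Set.mem_ofList _ _).mp hy)

-- A's counting loop builds Counter(data)
theorem aggressive_eq_sorted_items (data : List Int) :
    aggressive data =
      PySem.List.sorted ((PySem.Set.ofList data).map (fun k => (k, (data.count k : Int))))
        (fun p => p.1) false := by
  unfold aggressive
  have hfun : (fun (d : PySem.Dict Int Int) i =>
      if d.contains i then d.insert i (d.getD i 0 + 1) else d.insert i 1) =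
      (fun d i => d.insert i (d.getD i 0 + 1)) := by
    funext d i
    by_cases hc : d.contains i
    · simp [hc]
    · have hn : d.get? i = none :=
        (PySem.Dict.get?_eq_none_iff_contains d i).mpr (by simpa using hc)
      simp [hc, PySem.Dict.getD, hn]
  rw [hfun, PySem.Dict.foldl_insert_getD_add_one_eq_counter, PySem.Dict.items_counter]

-- ===== VERDICT (by name: the statement is the Claim_ definition above) =====
theorem aggressive_spec : Claim_equal_aggressive := by
  intro data _
  unfold Spec_aggressive
  set s := PySem.List.sorted data (fun x => x) false with hsdef
  have hsp : s.Pairwise (· ≤ ·) := by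
    simpa using PySem.List.sorted_pairwise data (fun x => x)
  have hperm : s.Perm data := PySem.List.sorted_perm data (fun x => x) false
  rw [aggressive_eq_sorted_items, alt_eq_rle, ← hsdef, rle_sorted_eq s hsp]
  apply PySem.List.sorted_eq_of_perm_of_pairwise_lt
  · -- permutation: same sets, same counts
    have hmap : (PySem.Set.ofList s).map (fun k => (k, (s.count k : Int))) =
        (PySem.Set.ofList s).map (fun k => (k, (data.count k : Int))) :=
      List.map_congr_left (fun k _ => by rw [hperm.count_eq])
    rw [hmap]
    apply List.Perm.map
    exact (List.perm_ext_iff_of_nodup (PySem.Set.nodup_ofList _) (PySem.Set.nodup_ofList _)).mpr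
      (fun a => by
        rw [PySem.Set.mem_ofList, PySem.Set.mem_ofList]
        exact hperm.mem_iff)
  · -- strictly increasing keys
    rw [List.pairwise_map]
    exact ofList_pairwise_lt s hsp
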